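-- pv_equiv track=rewrite | github.com/edmarkovich/AdventOfCode2021 | day17.py | getViableXsteps
-- ===== SOURCE A (Python) =====
-- def getViableXsteps(x1,x2):
--     out = {}
--     for i in range (0, x2+1): #initial speed
--         speed = i
--         travel = 0
--         for j in range(1, x2+1): # number of steps
--             travel += speed
--             if travel >= x1 and travel <= x2:
--                 if j not in out.keys():
--                     out[j]=set()
--                 out[j].add(i)
--             if speed >0:
--                 speed -= 1
--
--     return (out)
-- ===== SOURCE B (Python) =====
-- def getViableXsteps(x1, x2):
--     # Two-pointer sweep: position after j steps from speed i is T(i)-T(i-j) while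
--     # moving (j<=i) and T(i) afterwards, with T(n)=n*(n+1)//2.  For each i the
--     # hitting step counts form a contiguous interval found by sliding pointers.
--     out = {}
--     klo = 0  # first k with T(k) >= T(i) - x2
--     khi = 0  # first k with T(k) >  T(i) - x1
--     for i in range(0, x2 + 1):
--         Ti = i * (i + 1) // 2
--         while klo * (klo + 1) // 2 < Ti - x2:
--             klo += 1
--         while khi * (khi + 1) // 2 <= Ti - x1:
--             khi += 1
--         kmax = min(khi - 1, i - 1)
--         for k in range(kmax, klo - 1, -1):   # moving phase, steps j = i-k ascending
--             out.setdefault(i - k, set()).add(i)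
--         if x1 <= Ti and Ti <= x2:            # plateau: speed exhausted at position T(i)
--             for j in range(i + 1, x2 + 1):
--                 out.setdefault(j, set()).add(i)
--     return out
-- ===== Notes on version B (the rewrite author's own statement) =====
-- stated objective: faster
-- what changed: A simulates the probe step by step for every (initial speed, step count) pair; B uses the closed form position T(i)-T(i-j) of triangular numbers and a two-pointer sweep that maintains the contiguous interval of hitting step counts per initial speed, so it only touches actual hits plus O(x2) pointer moves.
import Mathlib
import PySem

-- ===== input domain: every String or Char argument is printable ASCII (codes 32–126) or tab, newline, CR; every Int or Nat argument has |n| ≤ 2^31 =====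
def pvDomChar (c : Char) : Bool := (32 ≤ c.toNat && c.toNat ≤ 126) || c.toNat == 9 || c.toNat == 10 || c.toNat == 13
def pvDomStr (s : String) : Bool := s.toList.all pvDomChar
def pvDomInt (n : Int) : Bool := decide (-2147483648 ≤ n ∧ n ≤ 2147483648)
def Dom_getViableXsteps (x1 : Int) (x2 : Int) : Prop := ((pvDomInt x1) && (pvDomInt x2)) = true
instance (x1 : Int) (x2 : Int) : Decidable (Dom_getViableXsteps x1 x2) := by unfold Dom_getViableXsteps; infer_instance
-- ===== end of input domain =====

-- B replaces A's per-(i,j) trajectory simulation by a two-pointer sweep over closed-form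
-- triangular-number positions (objective: faster, O(x2 + hits) vs O(x2^2) loop iterations).

-- ===== PORT A =====
-- one iteration of A's inner 'for j' loop; state = (speed, travel, out)
def pvAStep (x1 x2 i : Int)
    (st : Int × Int × PySem.Dict Int (PySem.Set Int)) (j : Int) :
    Int × Int × PySem.Dict Int (PySem.Set Int) :=
  let speed := st.1
  let travel := st.2.1 + speed
  let out := st.2.2
  let out := if x1 ≤ travel ∧ travel ≤ x2 then
      -- if j not in out.keys(): out[j] = set();  out[j].add(i)
      let out := if out.contains j then out else out.insert j PySem.Set.empty
      out.modify j PySem.Set.empty (fun s => PySem.Set.add s i)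
    else out
  let speed := if speed > 0 then speed - 1 else speed
  (speed, travel, out)

def getViableXsteps (x1 : Int) (x2 : Int) : List (Int × List Int) :=
  ((PySem.List.pyRange 0 (x2+1) 1).foldl
    (fun out i => ((PySem.List.pyRange 1 (x2+1) 1).foldl (pvAStep x1 x2 i) (i, 0, out)).2.2)
    PySem.Dict.empty).items

-- ===== PORT B =====
-- triangular number n*(n+1)//2; the division is exact (n*(n+1) is even and ≥ 0),
-- so Lean's Int '/' agrees with Python's '//' here
def pvTri (n : Int) : Int := n * (n + 1) / 2

-- 'while klo*(klo+1)//2 < b: klo += 1' (pointer, always ≥ 0 in B: kept as Nat)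
def pvAdvGe (b : Int) (k : Nat) : Nat :=
  if pvTri k < b then pvAdvGe b (k+1) else k
  termination_by (b - pvTri k).toNat
  decreasing_by
    have h2 : 2 * pvTri ((k : Int) + 1) = ((k:Int)+1)*((k:Int)+2) := by
      unfold pvTri
      rw [Int.mul_ediv_cancel' (Int.even_mul_succ_self ((k:Int)+1)).two_dvd]
      ring
    have h1 : 2 * pvTri (k : Int) = (k:Int)*((k:Int)+1) := by
      unfold pvTri
      rw [Int.mul_ediv_cancel' (Int.even_mul_succ_self (k:Int)).two_dvd]
    have : pvTri ((k:Int)+1) = pvTri (k:Int) + ((k:Int)+1) := by nlinarith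
    push_cast
    omega

-- 'while khi*(khi+1)//2 <= b: khi += 1'
def pvAdvGt (b : Int) (k : Nat) : Nat :=
  if pvTri k ≤ b then pvAdvGt b (k+1) else k
  termination_by (b + 1 - pvTri k).toNat
  decreasing_by
    have h2 : 2 * pvTri ((k : Int) + 1) = ((k:Int)+1)*((k:Int)+2) := by
      unfold pvTri
      rw [Int.mul_ediv_cancel' (Int.even_mul_succ_self ((k:Int)+1)).two_dvd]
      ring
    have h1 : 2 * pvTri (k : Int) = (k:Int)*((k:Int)+1) := by
      unfold pvTri
      rw [Int.mul_ediv_cancel' (Int.even_mul_succ_self (k:Int)).two_dvd]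
    have : pvTri ((k:Int)+1) = pvTri (k:Int) + ((k:Int)+1) := by nlinarith
    push_cast
    omega

-- out.setdefault(j, set()).add(i)
def pvBAdd (out : PySem.Dict Int (PySem.Set Int)) (j i : Int) :
    PySem.Dict Int (PySem.Set Int) :=
  (out.setdefault j PySem.Set.empty).modify j PySem.Set.empty (fun s => PySem.Set.add s i)

-- one iteration of B's outer 'for i' loop; state = (klo, khi, out)
def pvBStep (x1 x2 : Int)
    (st : Nat × Nat × PySem.Dict Int (PySem.Set Int)) (i : Int) :
    Nat × Nat × PySem.Dict Int (PySem.Set Int) :=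
  let Ti := pvTri i
  let klo := pvAdvGe (Ti - x2) st.1
  let khi := pvAdvGt (Ti - x1) st.2.1
  let out := st.2.2
  let kmax : Int := min ((khi : Int) - 1) (i - 1)
  let out := (PySem.List.pyRange kmax ((klo : Int) - 1) (-1)).foldl
      (fun out k => pvBAdd out (i - k) i) out
  let out := if x1 ≤ Ti ∧ Ti ≤ x2 then
      (PySem.List.pyRange (i+1) (x2+1) 1).foldl (fun out j => pvBAdd out j i) out
    else out
  (klo, khi, out)

def getViableXsteps_alt (x1 : Int) (x2 : Int) : List (Int × List Int) :=
  (((PySem.List.pyRange 0 (x2+1) 1).foldl (pvBStep x1 x2)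
      (0, 0, PySem.Dict.empty)).2.2).items

-- ===== PRECONDITION & SPEC =====
def Spec_getViableXsteps (x1 : Int) (x2 : Int) (out : List (Int × List Int)) : Prop := out = getViableXsteps_alt x1 x2
instance (x1 : Int) (x2 : Int) (out : List (Int × List Int)) : Decidable (Spec_getViableXsteps x1 x2 out) := by unfold Spec_getViableXsteps; infer_instance

-- ===== CLAIM (what is proved, stated in full; the proofs are below) =====
def Claim_equal_getViableXsteps : Prop := ∀ (x1 : Int) (x2 : Int), Dom_getViableXsteps x1 x2 → Spec_getViableXsteps x1 x2 (getViableXsteps x1 x2)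

-- ===== LEMMAS AND PROOFS =====

theorem pvTri_two_mul (n : Int) : 2 * pvTri n = n * (n + 1) := by
  unfold pvTri
  rw [Int.mul_ediv_cancel' (Int.even_mul_succ_self n).two_dvd]

theorem pvTri_succ (n : Int) : pvTri (n + 1) = pvTri n + (n + 1) := by
  have h1 := pvTri_two_mul n
  have h2 := pvTri_two_mul (n + 1)
  nlinarith

theorem pvTri_mono {a b : Int} (ha : 0 ≤ a) (hab : a ≤ b) : pvTri a ≤ pvTri b := by
  have h1 := pvTri_two_mul a
  have h2 := pvTri_two_mul b
  nlinarith

-- "speed after t steps" and "position after t steps" of A's simulation, i ≥ 0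
def pvSpd (i t : Int) : Int := if i - t ≤ 0 then 0 else i - t
def pvPos (i t : Int) : Int := pvTri i - pvTri (pvSpd i t)

theorem pvPos_step (i s : Int) : pvPos i (s-1) + pvSpd i (s-1) = pvPos i s := by
  have hsucc : pvTri (i - s + 1) = pvTri (i - s) + (i - s + 1) := pvTri_succ (i - s)
  have hz : pvTri (0:Int) = 0 := rfl
  unfold pvPos pvSpd
  rw [show i - (s - 1) = i - s + 1 from by ring]
  split_ifs with h1 h2 h2
  · simp
  · omega
  · have h0 : pvTri (i - s) = 0 := by rw [show i - s = (0:Int) from by omega]; rfl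
    omega
  · omega

theorem pvSpd_step (i s : Int) :
    (if pvSpd i (s-1) > 0 then pvSpd i (s-1) - 1 else pvSpd i (s-1)) = pvSpd i s := by
  unfold pvSpd
  split_ifs <;> omega

-- pointer invariants
def pvLow (b : Int) (k : Nat) : Prop := ∀ m : Nat, m < k → pvTri m < b
def pvHigh (b : Int) (k : Nat) : Prop := ∀ m : Nat, m < k → pvTri m ≤ b

theorem pvAdvGe_spec (b : Int) (k : Nat) (h : pvLow b k) :
    pvLow b (pvAdvGe b k) ∧ b ≤ pvTri (pvAdvGe b k) := by
  induction k using pvAdvGe.induct (b := b) with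
  | case1 k hlt ih =>
    rw [pvAdvGe, if_pos hlt]
    apply ih
    intro m hm
    rcases Nat.lt_or_ge m k with h' | h'
    · exact h m h'
    · have : m = k := by omega
      simpa [this] using hlt
  | case2 k hlt =>
    rw [pvAdvGe, if_neg hlt]
    exact ⟨h, by omega⟩

theorem pvAdvGt_spec (b : Int) (k : Nat) (h : pvHigh b k) :
    pvHigh b (pvAdvGt b k) ∧ b < pvTri (pvAdvGt b k) := by
  induction k using pvAdvGt.induct (b := b) with
  | case1 k hle ih =>
    rw [pvAdvGt, if_pos hle]
    apply ih
    intro m hm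
    rcases Nat.lt_or_ge m k with h' | h'
    · exact h m h'
    · have : m = k := by omega
      simpa [this] using hle
  | case2 k hle =>
    rw [pvAdvGt, if_neg hle]
    exact ⟨h, by omega⟩

theorem pvLow_char {b : Int} {r : Nat} (hL : pvLow b r) (hr : b ≤ pvTri r)
    {k : Int} (hk : 0 ≤ k) : b ≤ pvTri k ↔ (r : Int) ≤ k := by
  constructor
  · intro h
    by_contra hlt
    have hkr : k.toNat < r := by omega
    have := hL k.toNat hkr
    rw [show ((k.toNat : Int)) = k from by omega] at this
    omega
  · intro h
    calc b ≤ pvTri r := hr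
      _ ≤ pvTri k := pvTri_mono (by positivity) h

theorem pvHigh_char {b : Int} {r : Nat} (hH : pvHigh b r) (hr : b < pvTri r)
    {k : Int} (hk : 0 ≤ k) : pvTri k ≤ b ↔ k < (r : Int) := by
  constructor
  · intro h
    by_contra hge
    have : pvTri r ≤ pvTri k := pvTri_mono (by positivity) (by omega)
    omega
  · intro h
    have hkr : k.toNat < r := by omega
    have := hH k.toNat hkr
    rw [show ((k.toNat : Int)) = k from by omega] at this
    omega

-- A's conditional dict update equals B's setdefault-based one
theorem pvBAdd_eq (d : PySem.Dict Int (PySem.Set Int)) (j i : Int) :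
    ((if d.contains j then d else d.insert j PySem.Set.empty).modify j
      PySem.Set.empty (fun s => PySem.Set.add s i)) = pvBAdd d j i := by
  unfold pvBAdd
  by_cases hc : d.contains j
  · rw [PySem.Dict.setdefault_of_contains d PySem.Set.empty hc, if_pos hc]
  · rw [PySem.Dict.setdefault_of_not_contains d PySem.Set.empty (by simpa using hc), if_neg hc]

-- a fold guarded by an if is a fold over the filtered list
theorem pvFoldl_if_filter {α : Type} (g : PySem.Dict Int (PySem.Set Int) → α → PySem.Dict Int (PySem.Set Int))
    (P : α → Prop) [DecidablePred P] :
    ∀ (l : List α) (d : PySem.Dict Int (PySem.Set Int)),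
    l.foldl (fun d j => if P j then g d j else d) d = (l.filter (fun j => decide (P j))).foldl g d := by
  intro l
  induction l with
  | nil => intro d; rfl
  | cons a t ih =>
    intro d
    by_cases h : P a <;> simp [h, ih]

-- two strictly increasing integer lists with the same members are equal
theorem pvEq_of_pairwise_lt {l1 l2 : List Int} (h1 : l1.Pairwise (· < ·))
    (h2 : l2.Pairwise (· < ·)) (hm : ∀ x, x ∈ l1 ↔ x ∈ l2) : l1 = l2 := by
  induction l1 generalizing l2 with
  | nil =>
    cases l2 with
    | nil => rfl
    | cons b t2 => exact absurd ((hm b).2 (by simp)) (by simp)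
  | cons a t ih =>
    cases l2 with
    | nil => exact absurd ((hm a).1 (by simp)) (by simp)
    | cons b t2 =>
      have hpa := (List.pairwise_cons.1 h1).1
      have hpb := (List.pairwise_cons.1 h2).1
      have hab : a = b := by
        rcases List.mem_cons.1 ((hm a).1 (by simp)) with h | h
        · exact h
        · rcases List.mem_cons.1 ((hm b).2 (by simp)) with h' | h'
          · omega
          · have := hpa b h'
            have := hpb a h
            omega
      subst hab
      have : t = t2 := by
        apply ih (List.pairwise_cons.1 h1).2 (List.pairwise_cons.1 h2).2
        intro x
        constructor
        · intro hx
          rcases List.mem_cons.1 ((hm x).1 (List.mem_cons_of_mem _ hx)) with h | h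
          · have := hpa x hx; omega
          · exact h
        · intro hx
          rcases List.mem_cons.1 ((hm x).2 (List.mem_cons_of_mem _ hx)) with h | h
          · have := hpb x hx; omega
          · exact h
      rw [this]

theorem pvFilter_interval (u v l h : Int) :
    (PySem.List.pyRange u v 1).filter (fun j => decide (l ≤ j ∧ j ≤ h))
      = PySem.List.pyRange (max u l) (min v (h+1)) 1 := by
  apply pvEq_of_pairwise_lt
  · exact (PySem.List.pairwise_lt_pyRange_one u v).filter _
  · exact PySem.List.pairwise_lt_pyRange_one _ _
  · intro x
    simp only [List.mem_filter, PySem.List.mem_pyRange_one, decide_eq_true_eq]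
    omega

theorem pvMap_sub_pyRange (i a b : Int) :
    (PySem.List.pyRange a b (-1)).map (fun k => i - k) = PySem.List.pyRange (i-a) (i-b) 1 := by
  rw [PySem.List.pyRange_neg_one, PySem.List.pyRange_one, List.map_map]
  rw [show ((i - b) - (i - a)).toNat = (a - b).toNat from by omega]
  apply List.map_congr_left
  intro k _
  simp only [Function.comp]
  ring

-- A's inner simulation computes the filtered hit fold
theorem pvInner_sim (x1 x2 i : Int) :
    ∀ (m : Nat) (s : Int), 1 ≤ s → ∀ d,
    ((PySem.List.pyRange s (s+m) 1).foldl (pvAStep x1 x2 i) (pvSpd i (s-1), pvPos i (s-1), d)).2.2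
      = (PySem.List.pyRange s (s+m) 1).foldl
          (fun d j => if x1 ≤ pvPos i j ∧ pvPos i j ≤ x2 then pvBAdd d j i else d) d := by
  intro m
  induction m with
  | zero =>
    intro s hs d
    rw [show s + ((0:Nat):Int) = s from by push_cast; ring,
        PySem.List.pyRange_one_eq_nil le_rfl]
    rfl
  | succ m ih =>
    intro s hs d
    rw [PySem.List.pyRange_one_cons (by push_cast; omega : s < s + ((m+1:Nat):Int))]
    simp only [List.foldl_cons]
    have hstep : pvAStep x1 x2 i (pvSpd i (s-1), pvPos i (s-1), d) s
        = (pvSpd i s, pvPos i s,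
           if x1 ≤ pvPos i s ∧ pvPos i s ≤ x2 then pvBAdd d s i else d) := by
      unfold pvAStep
      simp only
      rw [pvPos_step i s, pvSpd_step i s, pvBAdd_eq]
    rw [hstep]
    have hrng : s + ((m+1:Nat):Int) = (s+1) + ((m:Nat):Int) := by push_cast; ring
    rw [hrng]
    have := ih (s+1) (by omega)
      (if x1 ≤ pvPos i s ∧ pvPos i s ≤ x2 then pvBAdd d s i else d)
    simpa using this

-- the heart: one outer iteration of A equals one outer iteration of B
theorem pvPer_i (x1 x2 i : Int) (klo khi : Nat) (d : PySem.Dict Int (PySem.Set Int))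
    (hi0 : 0 ≤ i) (hix : i ≤ x2)
    (hlo : pvLow (pvTri i - x2) klo) (hhi : pvHigh (pvTri i - x1) khi) :
    ((PySem.List.pyRange 1 (x2+1) 1).foldl (pvAStep x1 x2 i) (i, 0, d)).2.2
      = (pvBStep x1 x2 (klo, khi, d) i).2.2 := by
  obtain ⟨hlo', hge⟩ := pvAdvGe_spec (pvTri i - x2) klo hlo
  obtain ⟨hhi', hgt⟩ := pvAdvGt_spec (pvTri i - x1) khi hhi
  set klo' := pvAdvGe (pvTri i - x2) klo with hklo'
  set khi' := pvAdvGt (pvTri i - x1) khi with hkhi'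
  -- A's inner loop, via the simulation invariant, is the filtered hit fold
  have hinit : ((i:Int), (0:Int), d) = (pvSpd i 0, pvPos i 0, d) := by
    have h1 : pvSpd i 0 = i := by unfold pvSpd; split_ifs <;> omega
    have h2 : pvPos i 0 = 0 := by unfold pvPos; rw [h1]; ring
    rw [h1, h2]
  have hsim := pvInner_sim x1 x2 i x2.toNat 1 le_rfl d
  rw [show (1:Int) + ((x2.toNat:Nat):Int) = x2 + 1 from by omega] at hsim
  norm_num at hsim
  rw [hinit, hsim, pvFoldl_if_filter (fun d j => pvBAdd d j i)
        (fun j => x1 ≤ pvPos i j ∧ pvPos i j ≤ x2)]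
  rw [PySem.List.pyRange_one_append 1 (i+1) (x2+1) (by omega) (by omega),
      List.filter_append, List.foldl_append]
  -- moving phase: the hits in [1..i] form the interval B emits
  have hmov : (PySem.List.pyRange 1 (i+1) 1).filter
        (fun j => decide (x1 ≤ pvPos i j ∧ pvPos i j ≤ x2))
      = PySem.List.pyRange (i - min ((khi':Int) - 1) (i-1)) (i - (klo':Int) + 1) 1 := by
    have hcongr : ∀ j ∈ PySem.List.pyRange 1 (i+1) 1,
        decide (x1 ≤ pvPos i j ∧ pvPos i j ≤ x2)
          = decide (i - (khi':Int) + 1 ≤ j ∧ j ≤ i - (klo':Int)) := by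
      intro j hj
      rw [PySem.List.mem_pyRange_one] at hj
      have hsp : pvSpd i j = i - j := by unfold pvSpd; split_ifs <;> omega
      have hpos : pvPos i j = pvTri i - pvTri (i - j) := by unfold pvPos; rw [hsp]
      rw [decide_eq_decide]
      have hcl := pvLow_char hlo' hge (k := i - j) (by omega)
      have hch := pvHigh_char hhi' hgt (k := i - j) (by omega)
      rw [hpos]
      constructor
      · intro ⟨ha, hb⟩
        have h1 : (klo' : Int) ≤ i - j := hcl.1 (by omega)
        have h2 : i - j < (khi' : Int) := hch.1 (by omega)
        omega
      · intro ⟨ha, hb⟩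
        have h1 : pvTri i - x2 ≤ pvTri (i - j) := hcl.2 (by omega)
        have h2 : pvTri (i - j) ≤ pvTri i - x1 := hch.2 (by omega)
        omega
    rw [List.filter_congr hcongr, pvFilter_interval]
    have hknn : (0:Int) ≤ (klo' : Int) := by positivity
    congr 1
    · omega
    · omega
  -- plateau phase: for j > i the position is constantly pvTri i
  have hplat : (PySem.List.pyRange (i+1) (x2+1) 1).filter
        (fun j => decide (x1 ≤ pvPos i j ∧ pvPos i j ≤ x2))
      = if x1 ≤ pvTri i ∧ pvTri i ≤ x2 then PySem.List.pyRange (i+1) (x2+1) 1 else [] := by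
    have hcongr : ∀ j ∈ PySem.List.pyRange (i+1) (x2+1) 1,
        decide (x1 ≤ pvPos i j ∧ pvPos i j ≤ x2)
          = decide (x1 ≤ pvTri i ∧ pvTri i ≤ x2) := by
      intro j hj
      rw [PySem.List.mem_pyRange_one] at hj
      have hsp : pvSpd i j = 0 := by unfold pvSpd; split_ifs <;> omega
      have hpos : pvPos i j = pvTri i := by
        unfold pvPos; rw [hsp]; have : pvTri 0 = 0 := rfl; omega
      rw [hpos]
    rw [List.filter_congr hcongr]
    by_cases hc : x1 ≤ pvTri i ∧ pvTri i ≤ x2 <;> simp [hc]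
  rw [hmov, hplat]
  -- B's side: unfold one outer step of B and normalise its two loops
  show _ = (pvBStep x1 x2 (klo, khi, d) i).2.2
  unfold pvBStep
  simp only [← hklo', ← hkhi']
  rw [show ((PySem.List.pyRange (min ((khi':Int) - 1) (i-1)) ((klo':Int) - 1) (-1)).foldl
        (fun out k => pvBAdd out (i - k) i) d)
      = ((PySem.List.pyRange (min ((khi':Int) - 1) (i-1)) ((klo':Int) - 1) (-1)).map
          (fun k => i - k)).foldl (fun out j => pvBAdd out j i) d from
      (List.foldl_map (f := fun k => i - k) (g := fun out j => pvBAdd out j i)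
        (l := PySem.List.pyRange (min ((khi':Int) - 1) (i-1)) ((klo':Int) - 1) (-1))
        (init := d)).symm]
  rw [pvMap_sub_pyRange]
  rw [show i - ((klo':Int) - 1) = i - (klo':Int) + 1 from by ring]
  by_cases hc : x1 ≤ pvTri i ∧ pvTri i ≤ x2
  · rw [if_pos hc, if_pos hc]
  · rw [if_neg hc, if_neg hc]
    rfl

theorem pvOuter (x1 x2 : Int) :
    ∀ (m : Nat) (i0 : Int), 0 ≤ i0 → i0 + m = x2 + 1 →
    ∀ (d : PySem.Dict Int (PySem.Set Int)) (klo khi : Nat),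
    pvLow (pvTri i0 - x2) klo → pvHigh (pvTri i0 - x1) khi →
    (PySem.List.pyRange i0 (i0+m) 1).foldl
      (fun out i => ((PySem.List.pyRange 1 (x2+1) 1).foldl (pvAStep x1 x2 i) (i, 0, out)).2.2) d
      = ((PySem.List.pyRange i0 (i0+m) 1).foldl (pvBStep x1 x2) (klo, khi, d)).2.2 := by
  intro m
  induction m with
  | zero =>
    intro i0 hi0 hsum d klo khi hlo hhi
    rw [show i0 + ((0:Nat):Int) = i0 from by push_cast; ring,
        PySem.List.pyRange_one_eq_nil le_rfl]
    rfl
  | succ m ih =>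
    intro i0 hi0 hsum d klo khi hlo hhi
    have hix : i0 ≤ x2 := by push_cast at hsum; omega
    rw [PySem.List.pyRange_one_cons (by push_cast at hsum ⊢; omega : i0 < i0 + ((m+1:Nat):Int))]
    simp only [List.foldl_cons]
    have h22 := pvPer_i x1 x2 i0 klo khi d hi0 hix hlo hhi
    have hsplit : pvBStep x1 x2 (klo, khi, d) i0
        = (pvAdvGe (pvTri i0 - x2) klo, pvAdvGt (pvTri i0 - x1) khi,
           ((PySem.List.pyRange 1 (x2+1) 1).foldl (pvAStep x1 x2 i0) (i0, 0, d)).2.2) := by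
      rw [h22]
      rfl
    rw [hsplit]
    have hrng : i0 + ((m+1:Nat):Int) = (i0+1) + ((m:Nat):Int) := by push_cast; ring
    rw [hrng]
    have hTstep : pvTri i0 ≤ pvTri (i0+1) := by
      have := pvTri_succ i0
      omega
    obtain ⟨hlo', -⟩ := pvAdvGe_spec (pvTri i0 - x2) klo hlo
    obtain ⟨hhi', -⟩ := pvAdvGt_spec (pvTri i0 - x1) khi hhi
    exact ih (i0+1) (by omega) (by push_cast at hsum ⊢; omega) _ _ _
      (fun n hn => by have := hlo' n hn; omega)
      (fun n hn => by have := hhi' n hn; omega)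

-- ===== VERDICT (by name: the statement is the Claim_ definition above) =====
theorem getViableXsteps_spec : Claim_equal_getViableXsteps := by
  intro x1 x2 _
  unfold Spec_getViableXsteps getViableXsteps getViableXsteps_alt
  by_cases hx2 : x2 + 1 ≤ 0
  · rw [PySem.List.pyRange_one_eq_nil hx2]
    simp
  · have hm : (0:Int) + ((x2+1).toNat : Nat) = x2 + 1 := by omega
    have := pvOuter x1 x2 (x2+1).toNat 0 le_rfl (by omega) PySem.Dict.empty 0 0
      (by intro m hm'; omega) (by intro m hm'; omega)
    rw [hm] at this
    rw [this]
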